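-- pv_equiv track=rewrite | github.com/lzwjava/lzwjava.github.io | scripts/sync/sync_librechat.py | sanitize_yaml_lines
-- ===== SOURCE A (Python) =====
-- from typing import Iterable, Tuple
--
-- SENSITIVE_YAML_KEYS: Tuple[str, ...] = (
--     "apiKey",
--     "api_key",
--     "key",
--     "token",
--     "secret",
--     "password",
--     "accessToken",
--     "refreshToken",
--     "bearer",
-- )
--
-- def sanitize_yaml_lines(lines: Iterable[str]) -> str:
--     out_lines = []
--     for line in lines:
--         s = line.rstrip("\n")
--         # Skip comments and empty
--         if not s.strip() or s.lstrip().startswith("#"):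
--             out_lines.append(s)
--             continue
--
--         # Try to match simple key: value pairs, preserving indentation
--         stripped = s.lstrip()
--         indent_len = len(s) - len(stripped)
--         indent = s[:indent_len]
--
--         # Handle list item key: value (e.g., "- apiKey: abc")
--         if stripped.startswith("- "):
--             dash, rest = stripped.split(" ", 1)
--             # rest might be "apiKey: value"; try to split once on ':'
--             if ":" in rest:
--                 key, after = rest.split(":", 1)
--                 key_name = key.strip()
--                 if key_name in SENSITIVE_YAML_KEYS:
--                     out_lines.append(f"{indent}- {key_name}: \"\"")
--                     continue
--         else:
--             if ":" in stripped:
--                 key, after = stripped.split(":", 1)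
--                 key_name = key.strip()
--                 if key_name in SENSITIVE_YAML_KEYS:
--                     out_lines.append(f"{indent}{key_name}: \"\"")
--                     continue
--
--         out_lines.append(s)
--     return "\n".join(out_lines) + "\n"
-- ===== SOURCE B (Python) =====
-- from typing import Iterable, Tuple
--
-- SENSITIVE_YAML_KEYS: Tuple[str, ...] = (
--     "apiKey",
--     "api_key",
--     "key",
--     "token",
--     "secret",
--     "password",
--     "accessToken",
--     "refreshToken",
--     "bearer",
-- )
--
--
-- def _redact(s: str) -> str:
--     # generate-and-test: instead of parsing a key out of the line and looking it
--     # up in the set, try each sensitive key as a pattern against the line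
--     stripped = s.lstrip()
--     indent = s[: len(s) - len(stripped)]
--     if stripped.startswith("- "):
--         prefix, rest = "- ", stripped[2:].lstrip()
--     else:
--         prefix, rest = "", stripped
--     for k in SENSITIVE_YAML_KEYS:
--         if rest.startswith(k) and rest[len(k):].lstrip().startswith(":"):
--             return indent + prefix + k + ': ""'
--     return s
--
--
-- def sanitize_yaml_lines(lines: Iterable[str]) -> str:
--     return "\n".join(_redact(line.rstrip("\n")) for line in lines) + "\n"
-- ===== Notes on version B (the rewrite author's own statement) =====
-- stated objective: alternative
-- what changed: Inverts the matching direction: instead of parsing the line (split on the first space / first colon, strip the extracted key, membership-test it against the key tuple), B tries each of the nine sensitive keys as a pattern against the lstripped line (startswith key, then optional whitespace, then ':'), so no split/extract/lookup happens at all.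
import Mathlib
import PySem

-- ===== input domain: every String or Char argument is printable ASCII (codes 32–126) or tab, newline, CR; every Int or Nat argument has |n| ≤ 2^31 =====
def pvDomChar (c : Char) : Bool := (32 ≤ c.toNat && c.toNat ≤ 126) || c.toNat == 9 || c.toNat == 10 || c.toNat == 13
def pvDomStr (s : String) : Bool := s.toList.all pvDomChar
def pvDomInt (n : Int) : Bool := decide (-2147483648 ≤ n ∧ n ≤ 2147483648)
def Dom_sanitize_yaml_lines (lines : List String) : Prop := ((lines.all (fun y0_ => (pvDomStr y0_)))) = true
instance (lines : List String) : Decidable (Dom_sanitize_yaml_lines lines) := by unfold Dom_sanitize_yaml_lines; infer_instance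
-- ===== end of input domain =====

-- B inverts the matching direction: instead of A's parse-and-look-up (split the line at the
-- first space / first colon, strip the extracted key, test membership in the key tuple),
-- B tries each sensitive key as a pattern against the lstripped line; an alternative of the same cost.

-- the SENSITIVE_YAML_KEYS tuple, a module constant both programs share
def pvSensitiveKeys : List (List Char) :=
  ["apiKey".toList, "api_key".toList, "key".toList, "token".toList, "secret".toList,
   "password".toList, "accessToken".toList, "refreshToken".toList, "bearer".toList]

-- line.rstrip("\n"): drop every trailing '\n' (hand port; exact: rstrip(chars) removes
-- trailing characters from the set {'\n'}); both Pythons perform this same call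
def pvRstripNl (s : List Char) : List Char :=
  (s.reverse.dropWhile (· == '\n')).reverse

-- ===== PORT A =====
-- the body of A's loop for one line (after s = line.rstrip("\n"))
def pvA_process (s : List Char) : List Char :=
  if (PySem.Chars.strip s).isEmpty || PySem.Chars.startswith (PySem.Chars.lstrip s) ['#'] then s
  else
    let stripped := PySem.Chars.lstrip s
    let indent_len : Int := (PySem.Chars.len s : Int) - (PySem.Chars.len stripped : Int)
    let indent := PySem.Chars.slice s none (some indent_len)
    if PySem.Chars.startswith stripped ['-', ' '] then
      -- dash, rest = stripped.split(" ", 1): guarded by startswith "- ", piece 1 exists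
      let rest := (PySem.Chars.splitOnMax stripped [' '] 1).getD 1 []
      if PySem.Chars.isIn [':'] rest then
        let key := (PySem.Chars.splitOnMax rest [':'] 1).getD 0 []
        let key_name := PySem.Chars.strip key
        if pvSensitiveKeys.contains key_name then
          indent ++ ['-', ' '] ++ key_name ++ [':', ' ', '"', '"']
        else s
      else s
    else
      if PySem.Chars.isIn [':'] stripped then
        let key := (PySem.Chars.splitOnMax stripped [':'] 1).getD 0 []
        let key_name := PySem.Chars.strip key
        if pvSensitiveKeys.contains key_name then
          indent ++ key_name ++ [':', ' ', '"', '"']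
        else s
      else s

def sanitize_yaml_lines (lines : List String) : String :=
  String.ofList (PySem.Chars.join ['\n'] (lines.map (fun line => pvA_process (pvRstripNl line.toList))) ++ ['\n'])

-- ===== PORT B =====
-- the for-k-in-SENSITIVE_YAML_KEYS loop of _redact: first key whose pattern matches wins
def pvB_loop (indent pre rest s : List Char) : List (List Char) → List Char
  | [] => s
  | k :: ks =>
      if PySem.Chars.startswith rest k &&
         PySem.Chars.startswith
           (PySem.Chars.lstrip (PySem.Chars.slice rest (some (k.length : Int)) none)) [':'] then
        indent ++ pre ++ k ++ [':', ' ', '"', '"']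
      else pvB_loop indent pre rest s ks

-- _redact(s)
def pvB_redact (s : List Char) : List Char :=
  let stripped := PySem.Chars.lstrip s
  let indent := PySem.Chars.slice s none (some ((PySem.Chars.len s : Int) - (PySem.Chars.len stripped : Int)))
  if PySem.Chars.startswith stripped ['-', ' '] then
    pvB_loop indent ['-', ' '] (PySem.Chars.lstrip (PySem.Chars.slice stripped (some 2) none)) s pvSensitiveKeys
  else
    pvB_loop indent [] stripped s pvSensitiveKeys

def sanitize_yaml_lines_alt (lines : List String) : String :=
  String.ofList (PySem.Chars.join ['\n'] (lines.map (fun line => pvB_redact (pvRstripNl line.toList))) ++ ['\n'])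

-- ===== PRECONDITION & SPEC =====
def Spec_sanitize_yaml_lines (lines : List String) (out : String) : Prop := out = sanitize_yaml_lines_alt lines
instance (lines : List String) (out : String) : Decidable (Spec_sanitize_yaml_lines lines out) := by unfold Spec_sanitize_yaml_lines; infer_instance

-- ===== CLAIM (what is proved, stated in full; the proofs are below) =====
def Claim_equal_sanitize_yaml_lines : Prop := ∀ (lines : List String), Dom_sanitize_yaml_lines lines → Spec_sanitize_yaml_lines lines (sanitize_yaml_lines lines)

-- ===== LEMMAS AND PROOFS =====

-- a key usable in both characterizations: whitespace-free at both ends, colon-free, nonempty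
def pvGoodKey (k : List Char) : Prop :=
  PySem.Chars.lstrip k = k ∧ PySem.Chars.rstrip k = k ∧ ':' ∉ k ∧ k ≠ []

theorem pv_keys_good : ∀ k ∈ pvSensitiveKeys, pvGoodKey k := by
  intro k hk
  unfold pvGoodKey
  fin_cases hk <;> exact ⟨by decide, by decide, by decide, by decide⟩

theorem pv_keys_no_hash : ∀ k ∈ pvSensitiveKeys, k.head? ≠ some '#' := by decide

theorem pv_go_zero (sep : List Char) (fuel : Nat) (l cur : List Char) (acc : List (List Char)) :
    PySem.Chars.splitOnMax.go sep fuel 0 l cur acc = ((cur.reverse ++ l) :: acc).reverse := by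
  cases fuel with
  | zero => simp [PySem.Chars.splitOnMax.go]
  | succ f => cases l with
    | nil => simp [PySem.Chars.splitOnMax.go]
    | cons c rest => simp [PySem.Chars.splitOnMax.go]

theorem pv_go_one (x : Char) :
    ∀ (fuel : Nat) (l cur : List Char) (acc : List (List Char)), l.length < fuel →
      PySem.Chars.splitOnMax.go [x] fuel 1 l cur acc =
        acc.reverse ++ [cur.reverse ++ l.takeWhile (· != x)] ++
          (if x ∈ l then [(l.dropWhile (· != x)).tail] else []) := by
  intro fuel
  induction fuel with
  | zero => intro l cur acc h; omega
  | succ f ih =>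
    intro l cur acc h
    cases l with
    | nil => simp [PySem.Chars.splitOnMax.go]
    | cons c rest =>
      by_cases hc : x = c
      · subst hc
        simp only [PySem.Chars.splitOnMax.go, if_neg (by omega : ¬(1:Nat) = 0)]
        rw [if_pos (by simp [List.isPrefixOf])]
        rw [pv_go_zero]
        simp
      · simp only [PySem.Chars.splitOnMax.go, if_neg (by omega : ¬(1:Nat) = 0)]
        rw [if_neg (by simp [List.isPrefixOf, hc])]
        rw [ih rest (c :: cur) acc (by simp at h ⊢; omega)]
        have hcx : (c != x) = true := by simp [bne_iff_ne]; exact fun h' => hc h'.symm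
        simp [hcx, List.mem_cons, hc]

theorem pv_splitOnMax_one (x : Char) (cs : List Char) :
    PySem.Chars.splitOnMax cs [x] 1 =
      (cs.takeWhile (· != x)) :: (if x ∈ cs then [(cs.dropWhile (· != x)).tail] else []) := by
  unfold PySem.Chars.splitOnMax
  rw [if_neg (by omega)]
  rw [show Int.toNat 1 = 1 from rfl]
  rw [pv_go_one x (cs.length + 1) cs [] [] (by omega)]
  simp

theorem pv_rstrip_nil_iff (t : List Char) :
    PySem.Chars.rstrip t = [] ↔ ∀ c ∈ t, PySem.Chars.isspace c = true := by
  simp [PySem.Chars.rstrip, List.dropWhile_eq_nil_iff, List.mem_reverse]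

theorem pv_dropWhile_head_false (l : List Char) (p : Char → Bool) (c : Char) (u : List Char)
    (hp : l.dropWhile p = c :: u) : p c = false := by
  have := List.head_dropWhile_not p (l := l) (by simp [hp])
  simpa [hp] using this

-- dropWhile / takeWhile over an all-true block
theorem pv_dropWhile_all_append (p : Char → Bool) (l₁ l₂ : List Char)
    (h : ∀ c ∈ l₁, p c = true) : (l₁ ++ l₂).dropWhile p = l₂.dropWhile p := by
  induction l₁ with
  | nil => simp
  | cons a t ih =>
    simp only [List.cons_append, List.dropWhile_cons, h a (by simp), if_true]
    exact ih (fun c hc => h c (by simp [hc]))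

theorem pv_takeWhile_all_append (p : Char → Bool) (l₁ l₂ : List Char)
    (h : ∀ c ∈ l₁, p c = true) : (l₁ ++ l₂).takeWhile p = l₁ ++ l₂.takeWhile p := by
  induction l₁ with
  | nil => simp
  | cons a t ih =>
    simp only [List.cons_append, List.takeWhile_cons, h a (by simp), if_true]
    rw [ih (fun c hc => h c (by simp [hc]))]

theorem pv_lstrip_ws_append (w l : List Char) (hw : ∀ c ∈ w, PySem.Chars.isspace c = true) :
    PySem.Chars.lstrip (w ++ l) = PySem.Chars.lstrip l :=
  pv_dropWhile_all_append _ w l hw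

theorem pv_lstrip_key_append (k l : List Char) (hk : PySem.Chars.lstrip k = k) (hne : k ≠ []) :
    PySem.Chars.lstrip (k ++ l) = k ++ l := by
  unfold PySem.Chars.lstrip at hk ⊢
  rw [List.dropWhile_append, hk]
  simp [List.isEmpty_iff, hne]

theorem pv_rstrip_append_ws (k w : List Char) (hk : PySem.Chars.rstrip k = k)
    (hw : ∀ c ∈ w, PySem.Chars.isspace c = true) : PySem.Chars.rstrip (k ++ w) = k := by
  unfold PySem.Chars.rstrip at hk ⊢
  rw [List.reverse_append]
  rw [pv_dropWhile_all_append _ w.reverse k.reverse (fun c hc => hw c (List.mem_reverse.mp hc))]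
  exact hk

theorem pv_lstrip_idem (s : List Char) :
    PySem.Chars.lstrip (PySem.Chars.lstrip s) = PySem.Chars.lstrip s := by
  unfold PySem.Chars.lstrip
  cases hd : s.dropWhile PySem.Chars.isspace with
  | nil => simp
  | cons c u =>
    rw [List.dropWhile_cons, pv_dropWhile_head_false s _ c u hd]
    simp

theorem pv_rstrip_cons_not_ws (a : Char) (x : List Char) (ha : PySem.Chars.isspace a = false) :
    PySem.Chars.rstrip (a :: x) = a :: PySem.Chars.rstrip x := by
  unfold PySem.Chars.rstrip
  rw [show (a :: x).reverse = x.reverse ++ [a] from by simp]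
  rw [List.dropWhile_append]
  cases he : (x.reverse.dropWhile PySem.Chars.isspace).isEmpty with
  | true =>
    rw [if_pos rfl]
    rw [List.isEmpty_iff] at he
    simp [ha, he]
  | false =>
    rw [if_neg (by simp)]
    simp

-- the decomposition body = w0 ++ k ++ w1 ++ ':' :: v makes BOTH sides hold
theorem pv_decomp_pat (w0 w1 v k : List Char) (hk : pvGoodKey k)
    (hw0 : ∀ c ∈ w0, PySem.Chars.isspace c = true) (hw1 : ∀ c ∈ w1, PySem.Chars.isspace c = true) :
    PySem.Chars.lstrip (w0 ++ k ++ w1 ++ ':' :: v) = k ++ w1 ++ ':' :: v ∧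
    PySem.Chars.isIn [':'] (w0 ++ k ++ w1 ++ ':' :: v) = true ∧
    PySem.Chars.strip ((w0 ++ k ++ w1 ++ ':' :: v).takeWhile (· != ':')) = k := by
  obtain ⟨hkl, hkr, hkc, hkne⟩ := hk
  have hws_ne : ∀ c, PySem.Chars.isspace c = true → (c != ':') = true := by
    intro c hc
    simp only [bne_iff_ne, ne_eq]
    intro h
    rw [h] at hc
    exact absurd hc (by decide)
  refine ⟨?_, ?_, ?_⟩
  · rw [show w0 ++ k ++ w1 ++ ':' :: v = w0 ++ (k ++ (w1 ++ ':' :: v)) from by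
      simp [List.append_assoc]]
    rw [pv_lstrip_ws_append w0 _ hw0, pv_lstrip_key_append k _ hkl hkne]
    simp [List.append_assoc]
  · rw [PySem.Chars.isIn_iff_infix]
    exact ⟨w0 ++ k ++ w1, v, by simp⟩
  · have htk : (w0 ++ k ++ w1 ++ ':' :: v).takeWhile (· != ':') = w0 ++ k ++ w1 := by
      have hall : ∀ c ∈ w0 ++ k ++ w1, (c != ':') = true := by
        intro c hc
        simp only [List.mem_append] at hc
        rcases hc with (hc | hc) | hc
        · exact hws_ne c (hw0 c hc)
        · simp only [bne_iff_ne, ne_eq]; intro h; rw [h] at hc; exact hkc hc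
        · exact hws_ne c (hw1 c hc)
      calc (w0 ++ k ++ w1 ++ ':' :: v).takeWhile (· != ':')
          = ((w0 ++ k ++ w1) ++ ':' :: v).takeWhile (· != ':') := by simp [List.append_assoc]
        _ = (w0 ++ k ++ w1) ++ (':' :: v).takeWhile (· != ':') :=
            pv_takeWhile_all_append _ _ _ hall
        _ = w0 ++ k ++ w1 := by simp
    rw [htk]
    show PySem.Chars.rstrip (PySem.Chars.lstrip (w0 ++ k ++ w1)) = k
    rw [List.append_assoc, pv_lstrip_ws_append w0 _ hw0, pv_lstrip_key_append k _ hkl hkne]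
    exact pv_rstrip_append_ws k w1 hkr hw1

-- the per-key pattern test of B holds iff A would extract exactly this key
theorem pv_pat_iff (body k : List Char) (hk : pvGoodKey k) :
    (PySem.Chars.startswith (PySem.Chars.lstrip body) k &&
       PySem.Chars.startswith
         (PySem.Chars.lstrip ((PySem.Chars.lstrip body).drop k.length)) [':']) = true
    ↔ (PySem.Chars.isIn [':'] body = true ∧
        PySem.Chars.strip (body.takeWhile (· != ':')) = k) := by
  constructor
  · intro h
    rw [Bool.and_eq_true] at h
    obtain ⟨h1, h2⟩ := h
    obtain ⟨u, hu⟩ := (PySem.Chars.startswith_iff _ _).1 h1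
    have hdrop : (PySem.Chars.lstrip body).drop k.length = u := by
      rw [← hu, List.drop_left]
    rw [hdrop] at h2
    obtain ⟨v, hv⟩ : ∃ v, PySem.Chars.lstrip u = ':' :: v := by
      rcases (PySem.Chars.startswith_iff _ _).1 h2 with ⟨v, hv⟩
      exact ⟨v, by rw [← hv]; rfl⟩
    have hu_split : u = u.takeWhile PySem.Chars.isspace ++ ':' :: v := by
      conv_lhs => rw [← List.takeWhile_append_dropWhile (p := PySem.Chars.isspace) (l := u)]
      rw [show u.dropWhile PySem.Chars.isspace = ':' :: v from hv]
    have hbody : body = body.takeWhile PySem.Chars.isspace ++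
        (k ++ (u.takeWhile PySem.Chars.isspace ++ ':' :: v)) := by
      conv_lhs => rw [← List.takeWhile_append_dropWhile (p := PySem.Chars.isspace) (l := body)]
      rw [show body.dropWhile PySem.Chars.isspace = k ++ u from hu.symm, ← hu_split]
    have := pv_decomp_pat (body.takeWhile PySem.Chars.isspace) (u.takeWhile PySem.Chars.isspace)
      v k hk (fun c hc => List.mem_takeWhile_imp hc) (fun c hc => List.mem_takeWhile_imp hc)
    rw [show body.takeWhile PySem.Chars.isspace ++ k ++ u.takeWhile PySem.Chars.isspace ++ ':' :: v
        = body.takeWhile PySem.Chars.isspace ++ (k ++ (u.takeWhile PySem.Chars.isspace ++ ':' :: v))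
      from by simp [List.append_assoc]] at this
    rw [← hbody] at this
    exact ⟨this.2.1, this.2.2⟩
  · intro h
    obtain ⟨hcol, hstrip⟩ := h
    -- ':' ∈ body, so body splits at the first colon
    have hmem : ':' ∈ body := by
      rcases (PySem.Chars.isIn_iff_infix _ _).1 hcol with ⟨p, q, hpq⟩
      rw [← hpq]; simp
    obtain ⟨v, hv⟩ : ∃ v, body.dropWhile (· != ':') = ':' :: v := by
      cases hd : body.dropWhile (· != ':') with
      | nil =>
        exfalso
        rw [List.dropWhile_eq_nil_iff] at hd
        simpa using hd ':' hmem
      | cons c v =>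
        have hce := pv_dropWhile_head_false body _ c v hd
        simp only [bne_eq_false_iff_eq] at hce
        exact ⟨v, by rw [hce]⟩
    set seg := body.takeWhile (· != ':') with hseg
    have hbody : body = seg ++ ':' :: v := by
      conv_lhs => rw [← List.takeWhile_append_dropWhile (p := (· != ':')) (l := body)]
      rw [hv]
    -- seg = w0 ++ k ++ w1 from strip seg = k
    have hsegsplit : seg = seg.takeWhile PySem.Chars.isspace ++ PySem.Chars.lstrip seg := by
      conv_lhs => rw [← List.takeWhile_append_dropWhile (p := PySem.Chars.isspace) (l := seg)]
      rfl
    have hrs : PySem.Chars.rstrip (PySem.Chars.lstrip seg) = k := hstrip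
    obtain ⟨w1, hw1eq, hw1ws⟩ : ∃ w1, PySem.Chars.lstrip seg = k ++ w1 ∧
        (∀ c ∈ w1, PySem.Chars.isspace c = true) := by
      set m := PySem.Chars.lstrip seg with hm
      have : m.reverse.dropWhile PySem.Chars.isspace = k.reverse := by
        have := congrArg List.reverse hrs
        unfold PySem.Chars.rstrip at this
        simpa using this
      refine ⟨(m.reverse.takeWhile PySem.Chars.isspace).reverse, ?_, ?_⟩
      · have hm2 : m.reverse = m.reverse.takeWhile PySem.Chars.isspace ++ k.reverse := by
          conv_lhs => rw [← List.takeWhile_append_dropWhile (p := PySem.Chars.isspace) (l := m.reverse)]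
          rw [this]
        have := congrArg List.reverse hm2
        simpa using this
      · intro c hc
        exact List.mem_takeWhile_imp (List.mem_reverse.mp hc)
    have hbody2 : body = seg.takeWhile PySem.Chars.isspace ++ k ++ w1 ++ ':' :: v := by
      rw [hbody]
      conv_lhs => rw [hsegsplit, hw1eq]
      simp [List.append_assoc]
    have hd := pv_decomp_pat (seg.takeWhile PySem.Chars.isspace) w1 v k hk
      (fun c hc => List.mem_takeWhile_imp hc) hw1ws
    rw [Bool.and_eq_true]
    constructor
    · rw [hbody2, hd.1, PySem.Chars.startswith_iff]
      exact ⟨w1 ++ ':' :: v, by simp [List.append_assoc]⟩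
    · rw [hbody2, hd.1]
      rw [show k ++ w1 ++ ':' :: v = k ++ (w1 ++ ':' :: v) from by simp [List.append_assoc],
        List.drop_left]
      rw [pv_lstrip_ws_append w1 _ hw1ws]
      rw [show PySem.Chars.lstrip (':' :: v) = ':' :: v from by
        unfold PySem.Chars.lstrip
        simp [show PySem.Chars.isspace ':' = false from by decide]]
      rw [PySem.Chars.startswith_iff]
      exact ⟨v, rfl⟩

-- B's key loop finds exactly the key A's parse would extract
theorem pv_loop_found (indent pre body s : List Char) (ks : List (List Char))
    (hg : ∀ k ∈ ks, pvGoodKey k) (kn : List Char) (hmem : kn ∈ ks)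
    (hcol : PySem.Chars.isIn [':'] body = true)
    (hstrip : PySem.Chars.strip (body.takeWhile (· != ':')) = kn) :
    pvB_loop indent pre (PySem.Chars.lstrip body) s ks = indent ++ pre ++ kn ++ [':', ' ', '"', '"'] := by
  induction ks with
  | nil => simp at hmem
  | cons k ks ih =>
    have hslice : PySem.Chars.slice (PySem.Chars.lstrip body) (some (k.length : Int)) none
        = (PySem.Chars.lstrip body).drop k.length := by
      rw [PySem.Chars.slice_eq_listSlice, PySem.List.slice_from_natCast]
    rw [pvB_loop, hslice]
    by_cases hcond : (PySem.Chars.startswith (PySem.Chars.lstrip body) k &&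
        PySem.Chars.startswith
          (PySem.Chars.lstrip ((PySem.Chars.lstrip body).drop k.length)) [':']) = true
    · rw [if_pos hcond]
      have := ((pv_pat_iff body k (hg k (by simp))).1 hcond).2
      rw [hstrip] at this
      rw [this]
    · rw [if_neg hcond]
      have hne : kn ≠ k := by
        intro he
        exact hcond ((pv_pat_iff body k (hg k (by simp))).2 ⟨hcol, by rw [hstrip, he]⟩)
      have hmem2 : kn ∈ ks := by
        rcases List.mem_cons.mp hmem with h | h
        · exact absurd h hne
        · exact h
      exact ih (fun k' hk' => hg k' (by simp [hk'])) hmem2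

-- B's key loop fails when A's parse extracts no sensitive key
theorem pv_loop_none (indent pre body s : List Char) (ks : List (List Char))
    (hg : ∀ k ∈ ks, pvGoodKey k)
    (hnot : ∀ k ∈ ks, ¬ (PySem.Chars.isIn [':'] body = true ∧
        PySem.Chars.strip (body.takeWhile (· != ':')) = k)) :
    pvB_loop indent pre (PySem.Chars.lstrip body) s ks = s := by
  induction ks with
  | nil => rfl
  | cons k ks ih =>
    have hslice : PySem.Chars.slice (PySem.Chars.lstrip body) (some (k.length : Int)) none
        = (PySem.Chars.lstrip body).drop k.length := by
      rw [PySem.Chars.slice_eq_listSlice, PySem.List.slice_from_natCast]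
    rw [pvB_loop, hslice]
    rw [if_neg (fun hc => hnot k (by simp) ((pv_pat_iff body k (hg k (by simp))).1 hc))]
    exact ih (fun k' hk' => hg k' (by simp [hk'])) (fun k' hk' => hnot k' (by simp [hk']))

theorem pv_loop_found_r (indent pre rest body s : List Char) (ks : List (List Char))
    (hrest : rest = PySem.Chars.lstrip body)
    (hg : ∀ k ∈ ks, pvGoodKey k) (kn : List Char) (hmem : kn ∈ ks)
    (hcol : PySem.Chars.isIn [':'] body = true)
    (hstrip : PySem.Chars.strip (body.takeWhile (· != ':')) = kn) :
    pvB_loop indent pre rest s ks = indent ++ pre ++ kn ++ [':', ' ', '"', '"'] := by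
  subst hrest
  exact pv_loop_found indent pre body s ks hg kn hmem hcol hstrip

theorem pv_loop_none_r (indent pre rest body s : List Char) (ks : List (List Char))
    (hrest : rest = PySem.Chars.lstrip body)
    (hg : ∀ k ∈ ks, pvGoodKey k)
    (hnot : ∀ k ∈ ks, ¬ (PySem.Chars.isIn [':'] body = true ∧
        PySem.Chars.strip (body.takeWhile (· != ':')) = k)) :
    pvB_loop indent pre rest s ks = s := by
  subst hrest
  exact pv_loop_none indent pre body s ks hg hnot

theorem pv_strip_hash_cons (x : List Char) :
    PySem.Chars.strip ('#' :: x) = '#' :: PySem.Chars.rstrip x := by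
  show PySem.Chars.rstrip (PySem.Chars.lstrip ('#' :: x)) = _
  rw [show PySem.Chars.lstrip ('#' :: x) = '#' :: x from by
    unfold PySem.Chars.lstrip
    simp [show PySem.Chars.isspace '#' = false from by decide]]
  exact pv_rstrip_cons_not_ws '#' x (by decide)

theorem pv_redact_eq (s : List Char) : pvA_process s = pvB_redact s := by
  simp only [pvA_process, pvB_redact]
  by_cases hguard : ((PySem.Chars.strip s).isEmpty
      || PySem.Chars.startswith (PySem.Chars.lstrip s) ['#']) = true
  · rw [if_pos hguard]
    rw [Bool.or_eq_true] at hguard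
    cases hguard with
    | inl hempty =>
      have htnil : PySem.Chars.lstrip s = [] := by
        rw [List.isEmpty_iff] at hempty
        have hall : ∀ c ∈ PySem.Chars.lstrip s, PySem.Chars.isspace c = true :=
          (pv_rstrip_nil_iff _).1 hempty
        cases htc : PySem.Chars.lstrip s with
        | nil => rfl
        | cons c u =>
          have hns := pv_dropWhile_head_false s PySem.Chars.isspace c u htc
          have hc := hall c (by rw [htc]; simp)
          rw [hc] at hns
          cases hns
      rw [htnil]
      rw [if_neg (by decide : ¬ PySem.Chars.startswith [] ['-', ' '] = true)]
      refine (pv_loop_none_r _ [] [] [] s pvSensitiveKeys rfl pv_keys_good ?_).symm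
      intro k hk hcp
      obtain ⟨hcol, _⟩ := hcp
      rw [show PySem.Chars.isIn [':'] [] = false from by decide] at hcol
      cases hcol
    | inr hhash =>
      obtain ⟨u, hu⟩ : ∃ u, PySem.Chars.lstrip s = '#' :: u := by
        rcases (PySem.Chars.startswith_iff _ _).1 hhash with ⟨r, hr⟩
        exact ⟨r, hr.symm⟩
      have hdash : PySem.Chars.startswith (PySem.Chars.lstrip s) ['-', ' '] = false := by
        cases hb : PySem.Chars.startswith (PySem.Chars.lstrip s) ['-', ' '] with
        | false => rfl
        | true =>
          exfalso
          rcases (PySem.Chars.startswith_iff _ _).1 hb with ⟨r2, hr2⟩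
          rw [hu] at hr2
          simp only [List.cons_append, List.cons.injEq] at hr2
          exact absurd hr2.1 (by decide)
      rw [hdash, if_neg (by simp)]
      refine (pv_loop_none_r _ [] (PySem.Chars.lstrip s) (PySem.Chars.lstrip s) s
        pvSensitiveKeys (pv_lstrip_idem s).symm pv_keys_good ?_).symm
      intro k hk hcp
      obtain ⟨_, hstrip⟩ := hcp
      rw [hu] at hstrip
      rw [List.takeWhile_cons, if_pos (by decide : (('#' : Char) != ':') = true)] at hstrip
      rw [pv_strip_hash_cons] at hstrip
      have hh := pv_keys_no_hash k hk
      rw [← hstrip] at hh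
      exact hh rfl
  · rw [if_neg hguard]
    by_cases hdash : PySem.Chars.startswith (PySem.Chars.lstrip s) ['-', ' '] = true
    · rw [if_pos hdash, if_pos hdash]
      obtain ⟨u, hu⟩ : ∃ u, PySem.Chars.lstrip s = '-' :: ' ' :: u := by
        rcases (PySem.Chars.startswith_iff _ _).1 hdash with ⟨r, hr⟩
        exact ⟨r, hr.symm⟩
      have hrestA : (PySem.Chars.splitOnMax (PySem.Chars.lstrip s) [' '] 1).getD 1 [] = u := by
        rw [hu, pv_splitOnMax_one]
        rw [if_pos (by simp)]
        simp
      have hrestB : PySem.Chars.slice (PySem.Chars.lstrip s) (some 2) none = u := by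
        rw [PySem.Chars.slice_eq_listSlice,
          show (2 : Int) = ((2 : Nat) : Int) from by norm_num,
          PySem.List.slice_from_natCast, hu]
        rfl
      rw [hrestA, hrestB]
      by_cases hcol : PySem.Chars.isIn [':'] u = true
      · rw [if_pos hcol]
        have hkeyA : (PySem.Chars.splitOnMax u [':'] 1).getD 0 [] = u.takeWhile (· != ':') := by
          rw [pv_splitOnMax_one]
          rfl
        rw [hkeyA]
        by_cases hk : pvSensitiveKeys.contains (PySem.Chars.strip (u.takeWhile (· != ':'))) = true
        · rw [if_pos hk]
          exact (pv_loop_found_r _ ['-', ' '] _ u s pvSensitiveKeys rfl pv_keys_good _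
            (by simpa using hk) hcol rfl).symm
        · rw [if_neg hk]
          refine (pv_loop_none_r _ ['-', ' '] _ u s pvSensitiveKeys rfl pv_keys_good ?_).symm
          intro k hkm hcp
          obtain ⟨_, hstr⟩ := hcp
          exact hk (by rw [hstr]; simpa using hkm)
      · rw [if_neg hcol]
        refine (pv_loop_none_r _ ['-', ' '] _ u s pvSensitiveKeys rfl pv_keys_good ?_).symm
        intro k hkm hcp
        exact hcol hcp.1
    · rw [if_neg hdash, if_neg hdash]
      by_cases hcol : PySem.Chars.isIn [':'] (PySem.Chars.lstrip s) = true
      · rw [if_pos hcol]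
        have hkeyA : (PySem.Chars.splitOnMax (PySem.Chars.lstrip s) [':'] 1).getD 0 []
            = (PySem.Chars.lstrip s).takeWhile (· != ':') := by
          rw [pv_splitOnMax_one]
          rfl
        rw [hkeyA]
        by_cases hk : pvSensitiveKeys.contains
            (PySem.Chars.strip ((PySem.Chars.lstrip s).takeWhile (· != ':'))) = true
        · rw [if_pos hk]
          rw [pv_loop_found_r _ [] _ (PySem.Chars.lstrip s) s pvSensitiveKeys
            (pv_lstrip_idem s).symm pv_keys_good _ (by simpa using hk) hcol rfl]
          simp
        · rw [if_neg hk]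
          refine (pv_loop_none_r _ [] _ (PySem.Chars.lstrip s) s pvSensitiveKeys
            (pv_lstrip_idem s).symm pv_keys_good ?_).symm
          intro k hkm hcp
          obtain ⟨_, hstr⟩ := hcp
          exact hk (by rw [hstr]; simpa using hkm)
      · rw [if_neg hcol]
        refine (pv_loop_none_r _ [] _ (PySem.Chars.lstrip s) s pvSensitiveKeys
          (pv_lstrip_idem s).symm pv_keys_good ?_).symm
        intro k hkm hcp
        exact hcol hcp.1

-- ===== VERDICT (by name: the statement is the Claim_ definition above) =====
theorem sanitize_yaml_lines_spec : Claim_equal_sanitize_yaml_lines := by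
  intro lines _
  unfold Spec_sanitize_yaml_lines sanitize_yaml_lines sanitize_yaml_lines_alt
  congr 2
  congr 1
  apply List.map_congr_left
  intro l _
  rw [pv_redact_eq]
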